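-- pv_equiv track=rewrite | github.com/rsen-pattern/Collection-Page-Content-Writter | core/content_generator.py | parse_title_response
-- ===== SOURCE A (Python) =====
-- def parse_title_response(response_text: str) -> dict:
--     """Parse SEO title and collection title from response."""
--     result = {"seo_title": "", "collection_title": ""}
--
--     for line in response_text.strip().split("\n"):
--         line = line.strip()
--         if line.lower().startswith("seo title:"):
--             result["seo_title"] = line.split(":", 1)[1].strip()
--         elif line.lower().startswith("collection title:"):
--             result["collection_title"] = line.split(":", 1)[1].strip()
--
--     return result
-- ===== SOURCE B (Python) =====
-- def parse_title_response(response_text: str) -> dict: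
--     """Parse SEO title and collection title from response."""
--     seo = None
--     coll = None
--     # scan lines from the bottom; first hit from the end = last occurrence overall
--     for line in reversed(response_text.strip().split("\n")):
--         line = line.strip()
--         low = line.lower()
--         if seo is None and low.startswith("seo title:"):
--             seo = line.split(":", 1)[1].strip()
--         elif coll is None and low.startswith("collection title:"):
--             coll = line.split(":", 1)[1].strip()
--         if seo is not None and coll is not None:
--             break
--     return {"seo_title": seo if seo is not None else "",
--             "collection_title": coll if coll is not None else ""}
-- ===== Notes on version B (the rewrite author's own statement) =====
-- stated objective: alternative
-- what changed: A scans the lines top-down, overwriting a result dict so the last matching line wins; B scans the lines bottom-up keeping the first hit per key (= the last occurrence) and breaks early once both titles are found.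
import Mathlib
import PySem

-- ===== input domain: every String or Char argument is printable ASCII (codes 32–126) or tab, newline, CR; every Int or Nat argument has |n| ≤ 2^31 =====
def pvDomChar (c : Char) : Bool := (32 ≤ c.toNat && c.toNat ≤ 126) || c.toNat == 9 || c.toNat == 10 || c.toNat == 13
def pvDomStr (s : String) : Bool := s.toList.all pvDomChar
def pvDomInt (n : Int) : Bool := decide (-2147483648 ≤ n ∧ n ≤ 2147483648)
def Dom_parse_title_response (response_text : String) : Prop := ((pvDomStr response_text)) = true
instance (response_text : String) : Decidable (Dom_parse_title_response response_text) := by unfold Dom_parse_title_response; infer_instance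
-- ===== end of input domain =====

-- B replaces A's forward last-wins dict loop by a bottom-up scan with early exit (first hit from the end = last occurrence); return values proved equal.

-- ===== PORT A =====
-- loop body of A's for-loop; the '.getD ""' after pyGet? can never fire: the
-- startswith guard guarantees the stripped line contains ':', so split(":", 1) has 2 parts
def pvStepA (d : PySem.Dict String String) (l : String) : PySem.Dict String String :=
  let line := PySem.Str.strip l
  if PySem.Str.startswith (PySem.Str.lower line) "seo title:" then
    d.insert "seo_title" (PySem.Str.strip ((PySem.List.pyGet? ((PySem.Str.splitMax? line ":" 1).getD []) 1).getD ""))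
  else if PySem.Str.startswith (PySem.Str.lower line) "collection title:" then
    d.insert "collection_title" (PySem.Str.strip ((PySem.List.pyGet? ((PySem.Str.splitMax? line ":" 1).getD []) 1).getD ""))
  else d

def parse_title_response (response_text : String) : List (String × String) :=
  let init : PySem.Dict String String := PySem.Dict.ofList [("seo_title", ""), ("collection_title", "")]
  ((((PySem.Str.split? (PySem.Str.strip response_text) "\n").getD [])).foldl pvStepA init).items

-- ===== PORT B =====
-- B's reversed loop with early break; carries the two not-yet-found titles as Options
def pvGoB : List String → Option String → Option String → Option String × Option String
  | [], seo, coll => (seo, coll)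
  | l :: rest, seo, coll =>
    let line := PySem.Str.strip l
    let low := PySem.Str.lower line
    let p :=
      if seo.isNone && PySem.Str.startswith low "seo title:" then
        (some (PySem.Str.strip ((PySem.List.pyGet? ((PySem.Str.splitMax? line ":" 1).getD []) 1).getD "")), coll)
      else if coll.isNone && PySem.Str.startswith low "collection title:" then
        (seo, some (PySem.Str.strip ((PySem.List.pyGet? ((PySem.Str.splitMax? line ":" 1).getD []) 1).getD "")))
      else (seo, coll)
    if p.1.isSome && p.2.isSome then p else pvGoB rest p.1 p.2

def parse_title_response_alt (response_text : String) : List (String × String) :=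
  let p := pvGoB (((PySem.Str.split? (PySem.Str.strip response_text) "\n").getD [])).reverse none none
  [("seo_title", p.1.getD ""), ("collection_title", p.2.getD "")]

-- ===== PRECONDITION & SPEC =====
def Spec_parse_title_response (response_text : String) (out : List (String × String)) : Prop := out = parse_title_response_alt response_text
instance (response_text : String) (out : List (String × String)) : Decidable (Spec_parse_title_response response_text out) := by unfold Spec_parse_title_response; infer_instance

-- ===== CLAIM (what is proved, stated in full; the proofs are below) =====
def Claim_equal_parse_title_response : Prop := ∀ (response_text : String), Dom_parse_title_response response_text → Spec_parse_title_response response_text (parse_title_response response_text)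

-- ===== LEMMAS AND PROOFS =====

-- per-line predicates and the extracted title, shared by the proofs
def pvMS (l : String) : Bool := PySem.Str.startswith (PySem.Str.lower (PySem.Str.strip l)) "seo title:"
def pvMC (l : String) : Bool := PySem.Str.startswith (PySem.Str.lower (PySem.Str.strip l)) "collection title:"
def pvExt (l : String) : String :=
  PySem.Str.strip ((PySem.List.pyGet? ((PySem.Str.splitMax? (PySem.Str.strip l) ":" 1).getD []) 1).getD "")

-- the two prefixes are mutually exclusive (they start with different characters)
lemma pvExcl (l : String) (h : pvMS l = true) : pvMC l = false := by
  unfold pvMS at h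
  unfold pvMC
  rw [PySem.Str.startswith_eq] at h ⊢
  rw [PySem.Chars.startswith_iff] at h
  by_contra hcon
  rw [Bool.not_eq_false, PySem.Chars.startswith_iff] at hcon
  obtain ⟨t1, e1⟩ := h
  obtain ⟨t2, e2⟩ := hcon
  rw [← e1] at e2
  have h2 := congrArg List.head? e2
  simp at h2

-- first matching line scanning from the head
def pvFirstS : List String → Option String
  | [] => none
  | l :: rest => if pvMS l then some (pvExt l) else pvFirstS rest
def pvFirstC : List String → Option String
  | [] => none
  | l :: rest => if pvMC l then some (pvExt l) else pvFirstC rest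

lemma pvFirstS_append (xs ys : List String) : pvFirstS (xs ++ ys) = (pvFirstS xs).or (pvFirstS ys) := by
  induction xs with
  | nil => rfl
  | cons x xs ih => by_cases h : pvMS x <;> simp [pvFirstS, h, ih]

lemma pvFirstC_append (xs ys : List String) : pvFirstC (xs ++ ys) = (pvFirstC xs).or (pvFirstC ys) := by
  induction xs with
  | nil => rfl
  | cons x xs ih => by_cases h : pvMC x <;> simp [pvFirstC, h, ih]

-- one step of A's loop on the invariant dict shape
lemma pvStep_eq (a b : String) (l : String) (hex : pvMS l = true → pvMC l = false) :
    pvStepA (PySem.Dict.mk [("seo_title", a), ("collection_title", b)]) l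
      = PySem.Dict.mk [("seo_title", if pvMS l then pvExt l else a),
                       ("collection_title", if pvMC l then pvExt l else b)] := by
  by_cases hs : pvMS l
  · have hc := hex hs
    have hs' : PySem.Str.startswith (PySem.Str.lower (PySem.Str.strip l)) "seo title:" = true := hs
    simp only [pvStepA, hs, hc, hs', ite_true, ite_false, Bool.false_eq_true]
    rfl
  · by_cases hc : pvMC l
    · have hs' : PySem.Str.startswith (PySem.Str.lower (PySem.Str.strip l)) "seo title:" = false := by
        exact Bool.eq_false_iff.mpr hs
      have hc' : PySem.Str.startswith (PySem.Str.lower (PySem.Str.strip l)) "collection title:" = true := hc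
      simp only [pvStepA, hs, hc, hs', hc', ite_true, ite_false, Bool.false_eq_true]
      rfl
    · have hs' : PySem.Str.startswith (PySem.Str.lower (PySem.Str.strip l)) "seo title:" = false := by
        exact Bool.eq_false_iff.mpr hs
      have hc' : PySem.Str.startswith (PySem.Str.lower (PySem.Str.strip l)) "collection title:" = false := by
        exact Bool.eq_false_iff.mpr hc
      simp only [pvStepA, hs, hc, hs', hc', ite_true, ite_false, Bool.false_eq_true]

-- A's dict fold, characterised: key order fixed, value = last match = first match from the end
lemma pvFoldA (lines : List String) (a b : String) :
    (lines.foldl pvStepA (PySem.Dict.mk [("seo_title", a), ("collection_title", b)])).items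
      = [("seo_title", (pvFirstS lines.reverse).getD a), ("collection_title", (pvFirstC lines.reverse).getD b)] := by
  induction lines generalizing a b with
  | nil => rfl
  | cons l rest ih =>
    rw [List.foldl_cons, pvStep_eq a b l (pvExcl l), ih,
        List.reverse_cons, pvFirstS_append, pvFirstC_append]
    rcases hS : pvFirstS rest.reverse with _ | v <;> rcases hC : pvFirstC rest.reverse with _ | w <;>
      by_cases hm : pvMS l
    all_goals first
      | (have hn := pvExcl l hm
         simp [hS, hC, hm, hn, pvFirstS, pvFirstC])
      | (by_cases hn : pvMC l <;> simp [hS, hC, hm, hn, pvFirstS, pvFirstC])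

-- B's scan, characterised: first match in its (reversed) input, early break included
lemma pvGoB_char (lines : List String) (seo coll : Option String) :
    pvGoB lines seo coll = (seo.or (pvFirstS lines), coll.or (pvFirstC lines)) := by
  induction lines generalizing seo coll with
  | nil => simp [pvGoB, pvFirstS, pvFirstC]
  | cons l rest ih =>
    have eS : PySem.Str.startswith (PySem.Str.lower (PySem.Str.strip l)) "seo title:" = pvMS l := rfl
    have eC : PySem.Str.startswith (PySem.Str.lower (PySem.Str.strip l)) "collection title:" = pvMC l := rfl
    have hext : PySem.Str.strip ((PySem.List.pyGet? ((PySem.Str.splitMax? (PySem.Str.strip l) ":" 1).getD []) 1).getD "") = pvExt l := rfl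
    rcases seo with _ | s <;> rcases coll with _ | c <;>
      rcases hm : pvMS l <;> first
        | (have hn := pvExcl l hm
           simp only [pvGoB, pvFirstS, pvFirstC, eS, eC, hext, hm, hn,
             Bool.true_and, Bool.false_and, Bool.and_true, Bool.and_false, ite_true, ite_false,
             Option.isNone_none, Option.isNone_some, Option.isSome_none, Option.isSome_some,
             Bool.and_self, Option.some_or, Option.none_or, ih]
           simp)
        | (rcases hn : pvMC l <;>
           simp only [pvGoB, pvFirstS, pvFirstC, eS, eC, hext, hm, hn,
             Bool.true_and, Bool.false_and, Bool.and_true, Bool.and_false, ite_true, ite_false,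
             Option.isNone_none, Option.isNone_some, Option.isSome_none, Option.isSome_some,
             Bool.and_self, Option.some_or, Option.none_or, ih] <;>
           simp)

-- ===== VERDICT (by name: the statement is the Claim_ definition above) =====
theorem parse_title_response_spec : Claim_equal_parse_title_response := by
  intro rt _
  unfold Spec_parse_title_response parse_title_response parse_title_response_alt
  have h1 : PySem.Dict.ofList [("seo_title", ""), ("collection_title", "")]
      = PySem.Dict.mk [("seo_title", ""), ("collection_title", "")] := by rfl
  rw [h1, pvFoldA, pvGoB_char]
  simp
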